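-- pv_equiv track=rewrite | github.com/yejin7211/Algorithm | 프로그래머스/unrated/135808. 과일 장수/과일 장수.py | solution
-- ===== SOURCE A (Python) =====
-- def solution(k, m, score):
--     answer = 0
--     score.sort(reverse=True)
--     i = 0
--     while i < len(score):
--         box = []
--         for _ in range(m):
--             box.append(score[i])
--             i += 1
--             if i == len(score):
--                 break
--         if len(box) == m:
--             answer += min(box) * m
--     return answer
-- ===== SOURCE B (Python) =====
-- def solution(k, m, score):
--     # Sort descending once, then the minimum of each full box of m is simply
--     # every m-th element (index m-1, 2m-1, ...); no boxes are materialised.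
--     score.sort(reverse=True)
--     total = 0
--     for i in range(m - 1, len(score), m):
--         total += score[i]
--     return total * m
-- ===== Notes on version B (the rewrite author's own statement) =====
-- stated objective: simpler
-- what changed: Instead of materialising each box and taking its min, B observes that after a descending sort the minimum of the j-th full box is the element at index j*m-1, so it sums every m-th element of the sorted list directly and multiplies by m once; Pre_ excludes m <= 0 with a nonempty list, where A raises ValueError (m = 0) or loops forever (m < 0), and m = 0 with an empty list, where A returns 0 but B's range step of 0 raises ValueError.
-- outside the precondition, e.g. on solution(1, 0, []): A returns 0, B raises ValueError
import Mathlib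
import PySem

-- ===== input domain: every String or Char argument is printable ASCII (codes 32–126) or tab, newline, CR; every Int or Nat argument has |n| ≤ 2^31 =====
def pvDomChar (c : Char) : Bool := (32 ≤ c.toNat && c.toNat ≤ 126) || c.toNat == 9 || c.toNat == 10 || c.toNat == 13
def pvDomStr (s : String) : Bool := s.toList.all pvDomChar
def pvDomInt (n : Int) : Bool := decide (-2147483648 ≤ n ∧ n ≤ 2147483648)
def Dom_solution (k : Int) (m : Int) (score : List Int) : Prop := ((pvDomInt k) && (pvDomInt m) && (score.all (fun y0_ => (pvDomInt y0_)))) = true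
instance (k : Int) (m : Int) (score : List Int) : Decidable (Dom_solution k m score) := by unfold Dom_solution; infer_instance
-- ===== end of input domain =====

-- B replaces A's box-building inner loop by directly summing every m-th element of the
-- descending-sorted list (the min of each full box) — objective: simpler, same cost.
-- A sorts `score` in place; the equivalence proved here is about the RETURN value only.

-- ===== PORT A =====
-- the inner 'for _ in range(m)' loop: appends score[i], increments i, breaks when i == len(score)
def pvInnerFor (s : List Int) : Nat → Nat → List Int → List Int × Nat
  | 0, i, box => (box, i)
  | c+1, i, box =>
    let box' := box ++ [PySem.List.pyGetD s (i : Int) 0]  -- score[i]; Python has i < len(score) here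
    if i + 1 = s.length then (box', i + 1) else pvInnerFor s c (i + 1) box'

-- the outer 'while i < len(score)' loop; fuel = len(score) suffices on Pre_ (i grows each pass)
def pvWhile (s : List Int) (m : Int) : Nat → Nat → Int → Int
  | 0, _, answer => answer
  | f+1, i, answer =>
    if i < s.length then
      let r := pvInnerFor s m.toNat i []        -- box = []; for _ in range(m): …
      let answer' := if (r.1.length : Int) = m
        then answer + ((PySem.List.min? r.1 (fun x => x)).getD 0) * m   -- answer += min(box) * m
        else answer
      pvWhile s m f r.2 answer'
    else answer

def solution (k : Int) (m : Int) (score : List Int) : Int :=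
  let s := PySem.List.sorted score (fun x => x) true     -- score.sort(reverse=True)
  pvWhile s m s.length 0 0

-- ===== PORT B =====
def solution_alt (k : Int) (m : Int) (score : List Int) : Int :=
  let s := PySem.List.sorted score (fun x => x) true     -- score.sort(reverse=True)
  let total := (PySem.List.pyRange (m - 1) (s.length : Int) m).foldl
      (fun acc i => acc + PySem.List.pyGetD s i 0) 0     -- for i in range(m-1, len(score), m): total += score[i]
  total * m

-- ===== PRECONDITION & SPEC =====
-- Pre_ excludes m ≤ 0 with a nonempty list, where A returns nothing — it raises ValueError
-- (m = 0: min of the empty box) or loops forever (m < 0: i is never incremented) — and also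
-- m = 0 with an empty list, where A returns 0 but B's range step of 0 raises ValueError.
def Pre_solution (k : Int) (m : Int) (score : List Int) : Prop := 0 < m ∨ (score = [] ∧ m ≠ 0)
instance (k : Int) (m : Int) (score : List Int) : Decidable (Pre_solution k m score) := by unfold Pre_solution; infer_instance
def pvWitness_solution : Int × Int × List Int := (4, 3, [4, 1, 2, 2, 4, 4, 4, 3])
def Spec_solution (k : Int) (m : Int) (score : List Int) (out : Int) : Prop := out = solution_alt k m score
instance (k : Int) (m : Int) (score : List Int) (out : Int) : Decidable (Spec_solution k m score out) := by unfold Spec_solution; infer_instance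

-- ===== CLAIM (what is proved, stated in full; the proofs are below) =====
def Claim_equal_solution : Prop := ∀ (k : Int) (m : Int) (score : List Int), Dom_solution k m score → Pre_solution k m score → Spec_solution k m score (solution k m score)

-- ===== LEMMAS AND PROOFS =====

theorem pvGet_nat (s : List Int) (i : Nat) (hi : i < s.length) :
    PySem.List.pyGetD s (i : Int) 0 = s[i] := by
  rw [PySem.List.pyGetD_natCast, List.getD_eq_getElem?_getD, List.getElem?_eq_getElem hi]; rfl

theorem pvPyRange_pos_nil {a b s : Int} (hs : 0 < s) (h : b ≤ a) :
    PySem.List.pyRange a b s = [] := by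
  rw [PySem.List.pyRange_of_pos a b hs]
  simp [show ¬ a < b by omega]

theorem pvPyRange_pos_cons {a b s : Int} (hs : 0 < s) (h : a < b) :
    PySem.List.pyRange a b s = a :: PySem.List.pyRange (a + s) b s := by
  rw [PySem.List.pyRange_of_pos a b hs, PySem.List.pyRange_of_pos (a+s) b hs]
  simp only [if_pos h]
  by_cases h2 : a + s < b
  · rw [if_pos h2]
    have he : b - a + s - 1 = (b - (a+s) + s - 1) + 1 * s := by ring
    rw [he, Int.add_mul_ediv_right _ _ (by omega : s ≠ 0)]
    have hge : 0 ≤ (b - (a+s) + s - 1) / s := Int.ediv_nonneg (by omega) (by omega)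
    rw [show ((b - (a+s) + s - 1) / s + 1).toNat = ((b - (a+s) + s - 1)/s).toNat + 1 by omega]
    rw [List.range_succ_eq_map]
    simp [List.map_map, Function.comp]
    intro k _; ring
  · rw [if_neg h2]
    have he : b - a + s - 1 = (b - a - 1) + 1 * s := by ring
    rw [he, Int.add_mul_ediv_right _ _ (by omega : s ≠ 0)]
    have : (b - a - 1) / s = 0 := Int.ediv_eq_zero_of_lt (by omega) (by omega)
    rw [this]
    simp

-- the inner loop appends the contiguous segment starting at i and stops at min (i+c+1) n
theorem pvInnerFor_spec (s : List Int) (c : Nat) :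
    ∀ (i : Nat) (box : List Int), i < s.length →
    pvInnerFor s (c+1) i box
      = (box ++ (s.drop i).take (min (c+1) (s.length - i)), min (i + c + 1) s.length) := by
  induction c with
  | zero =>
    intro i box hi
    have hd : s.drop i = s[i] :: s.drop (i+1) := List.drop_eq_getElem_cons hi
    simp only [pvInnerFor]
    rw [show min 1 (s.length - i) = 1 by omega, show min (i+0+1) s.length = i+1 by omega]
    rw [pvGet_nat s i hi]
    split <;> (rw [hd]; rfl)
  | succ c ih =>
    intro i box hi
    have hd : s.drop i = s[i] :: s.drop (i+1) := List.drop_eq_getElem_cons hi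
    rw [pvInnerFor]
    split
    · next heq =>
      rw [show min (c+1+1) (s.length - i) = 1 by omega,
          show min (i+(c+1)+1) s.length = i+1 by omega]
      rw [pvGet_nat s i hi, hd]
      rfl
    · next hne =>
      have hi1 : i + 1 < s.length := by omega
      rw [ih (i+1) _ hi1]
      rw [pvGet_nat s i hi, hd]
      rw [show min (c+1+1) (s.length - i) = (min (c+1) (s.length - (i+1))) + 1 by omega,
          show i+1+c+1 = i+(c+1)+1 by omega, List.take_succ_cons]
      simp

theorem pvMinFold (t : List Int) : ∀ (x : Int), (x :: t).Pairwise (fun a b => b ≤ a) →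
    t.foldl min x = (x :: t).getLast (by simp) := by
  induction t with
  | nil => intro x _; simp
  | cons y t' ih =>
    intro x hp
    have hxy : y ≤ x := (List.pairwise_cons.mp hp).1 y (by simp)
    have hp' : (y :: t').Pairwise (fun a b => b ≤ a) := (List.pairwise_cons.mp hp).2
    rw [List.foldl_cons, min_eq_right hxy, ih y hp']
    simp [List.getLast_cons]

-- min of a descending list is its last element
theorem pvMin_descending (l : List Int) (h : l ≠ []) (hp : l.Pairwise (fun a b => b ≤ a)) :
    (PySem.List.min? l (fun x => x)).getD 0 = l.getLast h := by
  match l with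
  | x :: t =>
    rw [PySem.List.min?_id_cons, Option.getD_some]
    exact pvMinFold t x hp

-- the outer loop equals B's strided sum (start index i+m-1, stride m), times m
theorem pvWhile_spec (s : List Int) (m : Int) (hm : 0 < m)
    (hp : s.Pairwise (fun a b => b ≤ a)) :
    ∀ (fuel i : Nat) (answer : Int), s.length ≤ i + fuel →
    pvWhile s m fuel i answer
      = answer + ((PySem.List.pyRange ((i : Int) + m - 1) (s.length : Int) m).map
          (fun j => PySem.List.pyGetD s j 0)).sum * m := by
  intro fuel
  induction fuel with
  | zero =>
    intro i answer hle
    rw [pvWhile, pvPyRange_pos_nil hm (by omega)]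
    simp
  | succ f ih =>
    intro i answer hle
    simp only [pvWhile]
    by_cases hi : i < s.length
    · rw [if_pos hi]
      obtain ⟨c, hc⟩ : ∃ c, m.toNat = c + 1 := ⟨m.toNat - 1, by omega⟩
      have hmc : m = ((c : Int) + 1) := by omega
      rw [hc, pvInnerFor_spec s c i [] hi]
      simp only [List.nil_append, List.length_take, List.length_drop]
      by_cases hfull : i + (c + 1) ≤ s.length
      · rw [show min (min (c+1) (s.length - i)) (s.length - i) = c + 1 by omega]
        rw [if_pos (by push_cast; omega)]
        have hbox : ((s.drop i).take (min (c+1) (s.length - i))) = (s.drop i).take (c+1) := by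
          rw [show min (c+1) (s.length - i) = c+1 by omega]
        rw [hbox]
        have hne : (s.drop i).take (c+1) ≠ [] := by
          simp [List.take_eq_nil_iff]; omega
        have hpb : ((s.drop i).take (c+1)).Pairwise (fun a b => b ≤ a) :=
          List.Pairwise.sublist ((List.take_sublist _ _).trans (List.drop_sublist _ _)) hp
        rw [pvMin_descending _ hne hpb]
        have hlen : ((s.drop i).take (c+1)).length = c + 1 := by
          simp; omega
        have hlast : ((s.drop i).take (c+1)).getLast hne = s[i+c]'(by omega) := by
          rw [List.getLast_eq_getElem]
          simp only [hlen]
          rw [List.getElem_take, List.getElem_drop]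
          congr 1
        rw [hlast]
        rw [show min (i + c + 1) s.length = i + c + 1 by omega]
        rw [ih (i+c+1) _ (by omega)]
        rw [pvPyRange_pos_cons hm (by push_cast [hmc]; omega)
            (a := (i:Int) + m - 1) (b := (s.length : Int))]
        rw [List.map_cons, List.sum_cons]
        have h1 : ((i:Int) + m - 1) = (((i+c : Nat)) : Int) := by push_cast [hmc]; ring
        rw [h1, pvGet_nat s (i+c) (by omega)]
        have h2 : (((i+c+1 : Nat)) : Int) + m - 1 = ((i+c : Nat) : Int) + m := by push_cast; ring
        rw [h2]
        ring
      · rw [show min (min (c+1) (s.length - i)) (s.length - i) = s.length - i by omega]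
        rw [if_neg (by omega)]
        rw [show min (i + c + 1) s.length = s.length by omega]
        rw [ih s.length answer (by omega)]
        rw [pvPyRange_pos_nil hm (by omega),
            pvPyRange_pos_nil hm (by omega)]
    · rw [if_neg hi]
      rw [pvPyRange_pos_nil hm (by omega)]
      simp

theorem solution_spec' (k m : Int) (score : List Int) (hpre : Pre_solution k m score) :
    solution k m score = solution_alt k m score := by
  simp only [solution, solution_alt]
  by_cases hm : 0 < m
  · have hp : (PySem.List.sorted score (fun x => x) true).Pairwise (fun a b => b ≤ a) := by
      simpa using PySem.List.sorted_pairwise_rev score (fun x => x)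
    rw [pvWhile_spec _ m hm hp _ 0 0 (by omega)]
    rw [PySem.List.foldl_add]
    rw [show ((0:Nat):Int) + m - 1 = m - 1 by push_cast; ring]
    ring
  · obtain ⟨hnil, hm0⟩ : score = [] ∧ m ≠ 0 := hpre.resolve_left hm
    subst hnil
    have hs : PySem.List.sorted ([]:List Int) (fun x => x) true = [] := by
      rw [PySem.List.sorted_eq_nil_iff]
    simp only [hs]
    show pvWhile [] m 0 0 0 = _
    rw [pvWhile]
    have : PySem.List.pyRange (m-1) (([]:List Int).length : Int) m = [] := by
      simp only [PySem.List.pyRange]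
      rw [if_neg (by omega)]
      simp [show ¬ (0:Int) < m by omega, show ¬ ((1:Int) < m) by omega]
    rw [this]
    simp

-- ===== VERDICT (by name: the statement is the Claim_ definition above) =====
theorem solution_spec : Claim_equal_solution := by
  intro k m score _ hpre
  exact solution_spec' k m score hpre
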